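-- pv_equiv track=rewrite | github.com/MrBrantCode/unitest_baseline | mut_generate/mist_train_taco/taco_1780/solution.py | largest_k_multiple_free_subset_size
-- ===== SOURCE A (Python) =====
-- from collections import Counter
--
-- def largest_k_multiple_free_subset_size(n, k, a):
--     """
--     Calculate the size of the largest k-multiple free subset from a given set of distinct positive integers.
--
--     Parameters:
--     n (int): The number of integers in the set.
--     k (int): The multiplier for the k-multiple free set.
--     a (list of int): The list of distinct positive integers.
--
--     Returns:
--     int: The size of the largest k-multiple free subset.
--     """
--     a.sort()
--     count = Counter(a)
--
--     for num in a:
--         if count[num] == 0: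
--             continue
--         if count[num * k] > 0:
--             count[num * k] -= 1
--
--     return sum(count.values())
-- ===== SOURCE B (Python) =====
-- def largest_k_multiple_free_subset_size(n, k, a):
--     # Per-distinct-value chain arithmetic: one counting pass, then one pass over
--     # the sorted distinct values updating whole multiplicities at once (A walks
--     # every occurrence of the sorted list).  Note: A sorts `a` in place; B does not.
--     cnt = {}
--     for x in a:
--         cnt[x] = cnt.get(x, 0) + 1
--     rem = dict(cnt)
--     for v in sorted(cnt):
--         w = v * k
--         if w == v:
--             rem[v] = 0
--         elif rem[v] > 0 and rem.get(w, 0) > 0: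
--             rem[w] = max(rem[w] - cnt[v], 0)
--     return sum(rem.values())
-- ===== Notes on version B (the rewrite author's own statement) =====
-- stated objective: alternative
-- what changed: A walks every occurrence of the sorted list, decrementing a Counter one unit per occurrence; B builds the counts once and makes a single pass over the sorted distinct values, cancelling each value's whole multiplicity against its k-multiple with one arithmetic update (max(rem-cnt,0)) per value, so work per distinct value is O(1) instead of O(multiplicity); A also sorts `a` in place, B does not mutate it.
import Mathlib
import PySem

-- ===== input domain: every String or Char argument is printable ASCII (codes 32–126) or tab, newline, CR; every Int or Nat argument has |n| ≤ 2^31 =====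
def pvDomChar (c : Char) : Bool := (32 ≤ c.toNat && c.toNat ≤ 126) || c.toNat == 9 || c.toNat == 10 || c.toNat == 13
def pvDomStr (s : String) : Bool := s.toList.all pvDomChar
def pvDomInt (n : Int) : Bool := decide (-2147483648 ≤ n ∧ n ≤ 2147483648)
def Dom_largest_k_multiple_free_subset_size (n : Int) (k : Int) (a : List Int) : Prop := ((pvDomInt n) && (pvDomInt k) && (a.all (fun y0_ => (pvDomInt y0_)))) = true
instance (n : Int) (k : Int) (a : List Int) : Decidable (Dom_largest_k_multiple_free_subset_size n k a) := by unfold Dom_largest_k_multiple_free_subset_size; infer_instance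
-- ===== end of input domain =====

-- B replaces A's per-occurrence greedy over the sorted list by one counting pass plus one pass of
-- per-distinct-value arithmetic (objective: alternative). A sorts `a` in place, B does not mutate
-- it — the equivalence proved here is about the return value only.

-- ===== PORT A =====
-- the body of A's `for num in a` loop (count[x] on a Counter looks up with default 0)
def pvAstep (k : Int) (c : PySem.Dict Int Int) (num : Int) : PySem.Dict Int Int :=
  if c.getD num 0 = 0 then c
  else if c.getD (num * k) 0 > 0 then c.modify (num * k) 0 (· - 1)
  else c

def largest_k_multiple_free_subset_size (n : Int) (k : Int) (a : List Int) : Int :=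
  let as := PySem.List.sorted a (fun x => x)        -- a.sort()
  let count := PySem.Dict.counter as                -- count = Counter(a)
  let count := as.foldl (pvAstep k) count           -- for num in a: …
  count.values.sum                                  -- sum(count.values())

-- ===== PORT B =====
-- the body of B's `for v in sorted(cnt)` loop
def pvBstep (k : Int) (cnt : PySem.Dict Int Int) (r : PySem.Dict Int Int) (v : Int) : PySem.Dict Int Int :=
  let w := v * k
  if w = v then r.insert v 0
  else if r.getD v 0 > 0 ∧ r.getD w 0 > 0 then r.insert w (max (r.getD w 0 - cnt.getD v 0) 0)
  else r

def largest_k_multiple_free_subset_size_alt (n : Int) (k : Int) (a : List Int) : Int :=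
  let cnt := a.foldl (fun (c : PySem.Dict Int Int) x => c.insert x (c.getD x 0 + 1))
      PySem.Dict.empty                              -- cnt[x] = cnt.get(x, 0) + 1
  let rem := (PySem.List.sorted cnt.keys (fun x => x)).foldl (pvBstep k cnt) cnt
  rem.values.sum                                    -- sum(rem.values())

-- ===== PRECONDITION & SPEC =====
def Spec_largest_k_multiple_free_subset_size (n : Int) (k : Int) (a : List Int) (out : Int) : Prop := out = largest_k_multiple_free_subset_size_alt n k a
instance (n : Int) (k : Int) (a : List Int) (out : Int) : Decidable (Spec_largest_k_multiple_free_subset_size n k a out) := by unfold Spec_largest_k_multiple_free_subset_size; infer_instance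

-- ===== CLAIM (what is proved, stated in full; the proofs are below) =====
def Claim_equal_largest_k_multiple_free_subset_size : Prop := ∀ (n : Int) (k : Int) (a : List Int), Dom_largest_k_multiple_free_subset_size n k a → Spec_largest_k_multiple_free_subset_size n k a (largest_k_multiple_free_subset_size n k a)

-- ===== LEMMAS AND PROOFS =====

-- lookups agree on two nodup-keyed dicts whose item lists are permutations of each other
theorem pv_getD_eq_of_perm (c r : PySem.Dict Int Int) (hr : r.keys.Nodup)
    (h : c.items.Perm r.items) (u : Int) : c.getD u 0 = r.getD u 0 := by
  rw [PySem.Dict.getD_eq_get?_getD, PySem.Dict.getD_eq_get?_getD]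
  cases hg : c.get? u with
  | none =>
    rw [PySem.Dict.get?_eq_none_iff_not_mem_keys] at hg
    have : r.get? u = none := by
      rw [PySem.Dict.get?_eq_none_iff_not_mem_keys]
      intro hm
      exact hg (by simpa [PySem.Dict.keys] using
        (h.map Prod.fst).mem_iff.mpr (by simpa [PySem.Dict.keys] using hm))
    rw [this]
  | some val =>
    have := PySem.Dict.mem_items_of_get?_eq_some c hg
    have : r.get? u = some val := PySem.Dict.get?_of_mem_items r (h.mem_iff.mp this) hr
    rw [this]

theorem pv_contains_eq_of_perm (c r : PySem.Dict Int Int)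
    (h : c.items.Perm r.items) (u : Int) : c.contains u = r.contains u := by
  rw [PySem.Dict.contains_eq_decide_mem_keys, PySem.Dict.contains_eq_decide_mem_keys]
  have : u ∈ c.keys ↔ u ∈ r.keys := by
    simpa [PySem.Dict.keys] using (h.map Prod.fst).mem_iff
  simp [this]

-- inserting a key's current value back is a no-op
theorem pv_insert_getD_self (d : PySem.Dict Int Int) (hnd : d.keys.Nodup) {kk : Int}
    (h : d.contains kk = true) : d.insert kk (d.getD kk 0) = d := by
  apply PySem.Dict.ext
  rw [PySem.Dict.items_insert_of_contains d _ h]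
  conv_rhs => rw [← List.map_id d.items]
  apply List.map_congr_left
  intro p hp
  by_cases hk : p.1 = kk
  · have hp' : (kk, p.2) ∈ d.items := by rw [← hk]; exact hp
    have := PySem.Dict.getD_of_mem_items d hp' hnd 0
    simp only [hk, beq_self_eq_true, if_true, this]
    exact (Prod.ext_iff.mpr ⟨hk.symm, rfl⟩)
  · simp [hk]

-- a positive lookup means the key is present
theorem pv_contains_of_getD_pos (d : PySem.Dict Int Int) {kk : Int}
    (h : 0 < d.getD kk 0) : d.contains kk = true := by
  by_contra hc
  rw [PySem.Dict.getD_of_not_contains d 0 (by simpa using hc)] at h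
  omega

-- A's loop over the block of m copies of v, in closed form
theorem pv_group (k v : Int) (m : Nat) : ∀ (c : PySem.Dict Int Int),
    c.keys.Nodup → c.contains v = true → 0 ≤ c.getD v 0 →
    (v * k = v → c.getD v 0 ≤ (m : Int)) → 0 ≤ c.getD (v * k) 0 →
    List.foldl (pvAstep k) c (List.replicate m v) =
      if v * k = v then c.insert v 0
      else if 0 < c.getD v 0 ∧ 0 < c.getD (v * k) 0 then
        c.insert (v * k) (max (c.getD (v * k) 0 - (m : Int)) 0)
      else c := by
  induction m with
  | zero =>
    intro c hnd hcv h0 hm h0w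
    simp only [List.replicate, List.foldl_nil]
    by_cases hvk : v * k = v
    · have hz : c.getD v 0 = 0 := le_antisymm (by simpa using hm hvk) h0
      rw [if_pos hvk, ← hz, pv_insert_getD_self c hnd hcv]
    · rw [if_neg hvk]
      by_cases hcond : 0 < c.getD v 0 ∧ 0 < c.getD (v * k) 0
      · rw [if_pos hcond]
        have h1 : max (c.getD (v * k) 0 - ((0 : Nat) : Int)) 0 = c.getD (v * k) 0 := by
          simp; omega
        rw [h1, pv_insert_getD_self c hnd (pv_contains_of_getD_pos c hcond.2)]
      · rw [if_neg hcond]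
  | succ m ih =>
    intro c hnd hcv h0 hm h0w
    rw [List.replicate_succ, List.foldl_cons]
    by_cases hz : c.getD v 0 = 0
    · have hstep : pvAstep k c v = c := by simp [pvAstep, hz]
      rw [hstep, ih c hnd hcv h0 (fun _ => by omega) h0w]
      by_cases hvk : v * k = v
      · rw [if_pos hvk, if_pos hvk]
      · rw [if_neg hvk, if_neg hvk, if_neg (by rintro ⟨h1, _⟩; omega),
          if_neg (by rintro ⟨h1, _⟩; omega)]
    · have hv0 : 0 < c.getD v 0 := lt_of_le_of_ne h0 (Ne.symm hz)
      by_cases hw : 0 < c.getD (v * k) 0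
      · have hstep : pvAstep k c v = c.insert (v * k) (c.getD (v * k) 0 - 1) := by
          simp [pvAstep, hz, hw]; rfl
        rw [hstep]
        set w := v * k with hwdef
        have hgetD : ∀ u : Int, (c.insert w (c.getD w 0 - 1)).getD u 0 =
            if u = w then c.getD w 0 - 1 else c.getD u 0 := fun u =>
          PySem.Dict.getD_insert c w u _ 0
        have hnd' : (c.insert w (c.getD w 0 - 1)).keys.Nodup :=
          PySem.Dict.nodup_keys_insert c w _ hnd
        have hcv' : (c.insert w (c.getD w 0 - 1)).contains v = true := by
          rw [PySem.Dict.contains_insert]; simp [hcv]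
        by_cases hvk : w = v
        · have hcv'' : (c.insert w (c.getD w 0 - 1)).getD v 0 = c.getD v 0 - 1 := by
            rw [hgetD v, if_pos hvk.symm, hvk]
          have := ih (c.insert w (c.getD w 0 - 1)) hnd' hcv'
            (by rw [hcv'']; omega)
            (fun _ => by rw [hcv'']; have := hm hvk; push_cast at this ⊢; omega)
            (by rw [hgetD w, if_pos rfl]; omega)
          rw [this, if_pos hvk, if_pos hvk, hvk, PySem.Dict.insert_insert_self]
        · have hcvv : (c.insert w (c.getD w 0 - 1)).getD v 0 = c.getD v 0 := by
            rw [hgetD v, if_neg (fun h => hvk h.symm)]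
          have hcww : (c.insert w (c.getD w 0 - 1)).getD w 0 = c.getD w 0 - 1 := by
            rw [hgetD w, if_pos rfl]
          have := ih (c.insert w (c.getD w 0 - 1)) hnd' hcv'
            (by rw [hcvv]; omega)
            (fun h => absurd h hvk)
            (by rw [hcww]; omega)
          rw [hcvv, hcww] at this
          rw [this, if_neg hvk, if_neg hvk]
          by_cases hw1 : 0 < c.getD w 0 - 1
          · rw [if_pos ⟨hv0, hw1⟩, if_pos ⟨hv0, hw⟩, PySem.Dict.insert_insert_self]
            congr 1
            push_cast
            omega
          · rw [if_neg (by rintro ⟨_, h2⟩; omega), if_pos ⟨hv0, hw⟩]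
            congr 1
            push_cast
            omega
      · have hw0 : c.getD (v * k) 0 = 0 := le_antisymm (not_lt.mp hw) h0w
        have hvk : ¬ (v * k = v) := fun h => by rw [h] at hw0; omega
        have hstep : pvAstep k c v = c := by simp [pvAstep, hz, hw0]
        rw [hstep, ih c hnd hcv h0 (fun h => absurd h hvk) h0w,
          if_neg hvk, if_neg hvk, if_neg (by rintro ⟨_, h2⟩; omega),
          if_neg (by rintro ⟨_, h2⟩; omega)]

-- main simulation: A's fold over the grouped sorted list matches B's fold over the distinct values
theorem pv_main (k : Int) (a : List Int) : ∀ (S : List Int) (c r : PySem.Dict Int Int),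
    (∀ v ∈ S, c.contains v = true) → c.keys.Nodup → r.keys.Nodup → c.items.Perm r.items →
    (∀ u, 0 ≤ c.getD u 0 ∧ c.getD u 0 ≤ (a.count u : Int)) →
    (List.foldl (pvAstep k) c ((S.map (fun v => List.replicate (a.count v) v)).flatten)).items.Perm
      (List.foldl (pvBstep k (PySem.Dict.counter a)) r S).items := by
  intro S
  induction S with
  | nil => intro c r _ _ _ hperm _; simpa using hperm
  | cons v S' ih =>
    intro c r hS hndc hndr hperm hbound
    rw [List.map_cons, List.flatten_cons, List.foldl_append, List.foldl_cons]
    have hcv : c.contains v = true := hS v (List.mem_cons_self ..)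
    have hG := pv_group k v (a.count v) c hndc hcv (hbound v).1
      (fun _ => (hbound v).2) (hbound (v * k)).1
    have hgd := pv_getD_eq_of_perm c r hndr hperm
    have hct := pv_contains_eq_of_perm c r hperm
    have hcnt : (PySem.Dict.counter a).getD v 0 = (a.count v : Int) :=
      PySem.Dict.getD_counter a v
    by_cases hvk : v * k = v
    · rw [hG, if_pos hvk]
      have hrv : r.contains v = true := by rw [← hct]; exact hcv
      have hB : pvBstep k (PySem.Dict.counter a) r v = r.insert v 0 := by
        simp [pvBstep, hvk]
      rw [hB]
      apply ih
      · intro u hu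
        rw [PySem.Dict.contains_insert]
        simp [hS u (List.mem_cons_of_mem _ hu)]
      · exact PySem.Dict.nodup_keys_insert c v 0 hndc
      · exact PySem.Dict.nodup_keys_insert r v 0 hndr
      · rw [PySem.Dict.items_insert_of_contains c 0 hcv,
          PySem.Dict.items_insert_of_contains r 0 hrv]
        exact hperm.map _
      · intro u
        rw [PySem.Dict.getD_insert]
        by_cases hu : u = v
        · simp only [if_pos hu]; constructor <;> [omega; positivity]
        · simp only [if_neg hu]; exact hbound u
    · rw [hG, if_neg hvk]
      by_cases hcond : 0 < c.getD v 0 ∧ 0 < c.getD (v * k) 0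
      · rw [if_pos hcond]
        have hcw : c.contains (v * k) = true := pv_contains_of_getD_pos c hcond.2
        have hrw : r.contains (v * k) = true := by rw [← hct]; exact hcw
        have hB : pvBstep k (PySem.Dict.counter a) r v =
            r.insert (v * k) (max (r.getD (v * k) 0 - (PySem.Dict.counter a).getD v 0) 0) := by
          simp only [pvBstep]
          rw [if_neg hvk, if_pos ⟨by rw [← hgd]; exact hcond.1, by rw [← hgd]; exact hcond.2⟩]
        have hval : max (c.getD (v * k) 0 - (a.count v : Int)) 0 =
            max (r.getD (v * k) 0 - (PySem.Dict.counter a).getD v 0) 0 := by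
          rw [← hgd, hcnt]
        rw [hB]
        apply ih
        · intro u hu
          rw [PySem.Dict.contains_insert]
          simp [hS u (List.mem_cons_of_mem _ hu)]
        · exact PySem.Dict.nodup_keys_insert c _ _ hndc
        · exact PySem.Dict.nodup_keys_insert r _ _ hndr
        · rw [PySem.Dict.items_insert_of_contains c _ hcw,
            PySem.Dict.items_insert_of_contains r _ hrw, ← hval]
          exact hperm.map _
        · intro u
          rw [PySem.Dict.getD_insert]
          by_cases hu : u = v * k
          · simp only [if_pos hu]
            have h1 := (hbound (v * k)).1
            have h2 := (hbound (v * k)).2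
            have h3 : (0 : Int) ≤ (a.count v : Int) := by positivity
            subst hu
            omega
          · simp only [if_neg hu]; exact hbound u
      · rw [if_neg hcond]
        have hB : pvBstep k (PySem.Dict.counter a) r v = r := by
          simp only [pvBstep]
          rw [if_neg hvk, if_neg (by rintro ⟨h1, h2⟩; rw [← hgd] at h1 h2; exact hcond ⟨h1, h2⟩)]
        rw [hB]
        exact ih c r (fun u hu => hS u (List.mem_cons_of_mem _ hu)) hndc hndr hperm hbound

theorem pv_sum_indicator (x : Int) (f : Int → Nat) : ∀ (S : List Int), S.Nodup →
    (S.map (fun v => if v = x then f v else 0)).sum = if x ∈ S then f x else 0 := by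
  intro S
  induction S with
  | nil => simp
  | cons v S' ih =>
    intro hnd
    rw [List.map_cons, List.sum_cons, ih hnd.of_cons]
    by_cases hv : v = x
    · subst hv
      rw [if_pos rfl, if_neg (by simpa using (List.nodup_cons.mp hnd).1),
        if_pos (List.mem_cons_self ..)]
      omega
    · rw [if_neg hv]
      by_cases hx : x ∈ S'
      · rw [if_pos hx, if_pos (List.mem_cons_of_mem _ hx)]; omega
      · rw [if_neg hx, if_neg (by
          intro h
          rcases List.mem_cons.mp h with h | h
          exacts [hv h.symm, hx h])]

-- the sorted list is the concatenation of the blocks of its distinct values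
theorem pv_sorted_flatten (a : List Int) :
    PySem.List.sorted a (fun x => x) =
      (((PySem.List.sorted (PySem.Set.ofList a) (fun x => x)).map
        (fun v => List.replicate (a.count v) v)).flatten) := by
  set S := PySem.List.sorted (PySem.Set.ofList a) (fun x => x) with hSdef
  have hSperm : S.Perm (PySem.Set.ofList a) :=
    PySem.List.sorted_perm (PySem.Set.ofList a) (fun x => x) false
  have hSnd : S.Nodup := hSperm.symm.nodup (PySem.Set.nodup_ofList a)
  have hmemS : ∀ x : Int, x ∈ S ↔ x ∈ a := fun x => by
    rw [hSperm.mem_iff, PySem.Set.mem_ofList]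
  apply List.Perm.eq_of_pairwise (le := fun x y : Int => x ≤ y)
    (fun x y _ _ h1 h2 => le_antisymm h1 h2)
  · exact PySem.List.sorted_pairwise a (fun x => x)
  · rw [List.pairwise_flatten]
    constructor
    · intro l hl
      obtain ⟨v, _, rfl⟩ := List.mem_map.mp hl
      rw [List.pairwise_replicate]
      right; exact le_refl v
    · rw [List.pairwise_map]
      refine (PySem.List.sorted_pairwise (PySem.Set.ofList a) (fun x => x)).imp ?_
      intro x y hxy p hp q hq
      rw [List.eq_of_mem_replicate hp, List.eq_of_mem_replicate hq]
      exact hxy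
  · refine (PySem.List.sorted_perm a (fun x => x) false).trans ?_
    rw [List.perm_iff_count]
    intro x
    rw [List.count_flatten, List.map_map]
    have heq : (S.map ((List.count x) ∘ (fun v => List.replicate (a.count v) v)))
        = S.map (fun v => if v = x then a.count v else 0) := by
      apply List.map_congr_left
      intro v _
      simp only [Function.comp_apply, List.count_replicate]
      by_cases hv : v = x <;> simp [hv]
    rw [heq, pv_sum_indicator x (fun v => a.count v) S hSnd]
    by_cases hx : x ∈ a
    · rw [if_pos ((hmemS x).mpr hx)]
    · rw [if_neg (fun h => hx ((hmemS x).mp h)), List.count_eq_zero_of_not_mem hx]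

theorem pv_final (n k : Int) (a : List Int) :
    largest_k_multiple_free_subset_size n k a = largest_k_multiple_free_subset_size_alt n k a := by
  show (List.foldl (pvAstep k) (PySem.Dict.counter (PySem.List.sorted a (fun x => x)))
      (PySem.List.sorted a (fun x => x))).values.sum =
    (List.foldl (pvBstep k (List.foldl (fun (c : PySem.Dict Int Int) x => c.insert x (c.getD x 0 + 1)) PySem.Dict.empty a))
      (List.foldl (fun (c : PySem.Dict Int Int) x => c.insert x (c.getD x 0 + 1)) PySem.Dict.empty a)
      (PySem.List.sorted (List.foldl (fun (c : PySem.Dict Int Int) x => c.insert x (c.getD x 0 + 1)) PySem.Dict.empty a).keys (fun x => x))).values.sum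
  rw [PySem.Dict.foldl_insert_getD_add_one_eq_counter, PySem.Dict.keys_counter]
  have hasperm : (PySem.List.sorted a (fun x => x)).Perm a := PySem.List.sorted_perm a _ false
  set as := PySem.List.sorted a (fun x => x) with hasdef
  set S := PySem.List.sorted (PySem.Set.ofList a) (fun x => x) with hSdef
  have hSmem : ∀ v ∈ S, v ∈ a := fun v hv =>
    (PySem.Set.mem_ofList a v).mp ((PySem.List.sorted_perm _ _ false).mem_iff.mp hv)
  have hS : ∀ v ∈ S, (PySem.Dict.counter as).contains v = true := by
    intro v hv
    rw [PySem.Dict.contains_counter]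
    simpa using hasperm.mem_iff.mpr (hSmem v hv)
  have hperm0 : (PySem.Dict.counter as).items.Perm (PySem.Dict.counter a).items := by
    rw [PySem.Dict.items_counter, PySem.Dict.items_counter]
    have hmapeq : (fun v : Int => (v, (List.count v as : Int))) =
        (fun v : Int => (v, (List.count v a : Int))) :=
      funext fun v => by rw [hasperm.count_eq v]
    rw [hmapeq]
    apply List.Perm.map
    rw [List.perm_ext_iff_of_nodup (PySem.Set.nodup_ofList as) (PySem.Set.nodup_ofList a)]
    intro v
    rw [PySem.Set.mem_ofList, PySem.Set.mem_ofList, hasperm.mem_iff]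
  have hbound : ∀ u, 0 ≤ (PySem.Dict.counter as).getD u 0 ∧
      (PySem.Dict.counter as).getD u 0 ≤ (a.count u : Int) := by
    intro u
    rw [PySem.Dict.getD_counter, hasperm.count_eq u]
    exact ⟨by positivity, le_refl _⟩
  have h := pv_main k a S (PySem.Dict.counter as) (PySem.Dict.counter a) hS
    (PySem.Dict.nodup_keys_counter as) (PySem.Dict.nodup_keys_counter a) hperm0 hbound
  have hflat : as = ((S.map (fun v => List.replicate (a.count v) v)).flatten) := by
    rw [hasdef, hSdef]; exact pv_sorted_flatten a
  rw [hflat] at h ⊢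
  exact List.Perm.sum_eq (h.map Prod.snd)

-- ===== VERDICT (by name: the statement is the Claim_ definition above) =====
theorem largest_k_multiple_free_subset_size_spec : Claim_equal_largest_k_multiple_free_subset_size := by
  intro n k a _
  unfold Spec_largest_k_multiple_free_subset_size
  exact pv_final n k a
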